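-- pv_equiv track=rewrite | github.com/ZTertychny/python-gb | gb_algorithms/lesson_08/les_8_task_1.py | handshakes_of_friends
-- ===== SOURCE A (Python) =====
-- def handshakes_of_friends(number):
--     graph_matrix = []
--     ribs = 0
--
--     vertex = 0
--     while vertex != number:
--         line_matrix = []
--         line_matrix = [1 if i > vertex else 0 for i in range(number)]
--         graph_matrix.append(line_matrix)
--
--         vertex += 1
--
--     for line in graph_matrix:
--         for el in line:
--             if el == 1:
--                 ribs += 1
--     return f'Количество рукопожатий {number} друзей составило {ribs}'
-- ===== SOURCE B (Python) =====
-- def handshakes_of_friends(number):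
--     ribs = number * (number - 1) // 2
--     return f'Количество рукопожатий {number} друзей составило {ribs}'
-- ===== Notes on version B (the rewrite author's own statement) =====
-- stated objective: faster
-- what changed: Replaces building an n x n adjacency matrix and counting its 1-entries with the closed-form formula n(n-1)//2.
import Mathlib
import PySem

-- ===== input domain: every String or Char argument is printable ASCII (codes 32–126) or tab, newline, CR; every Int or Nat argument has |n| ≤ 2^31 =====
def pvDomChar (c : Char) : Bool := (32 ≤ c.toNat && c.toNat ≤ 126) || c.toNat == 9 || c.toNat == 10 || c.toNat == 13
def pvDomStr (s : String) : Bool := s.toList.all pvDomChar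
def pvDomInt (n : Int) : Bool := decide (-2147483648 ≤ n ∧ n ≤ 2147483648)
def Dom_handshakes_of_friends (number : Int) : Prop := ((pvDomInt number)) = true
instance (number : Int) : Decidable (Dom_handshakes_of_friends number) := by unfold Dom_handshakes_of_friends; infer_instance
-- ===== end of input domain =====

-- B replaces A's O(n^2) adjacency-matrix construction and scan with the closed form n(n-1)//2 (objective: faster, asymptotic).

-- ===== PORT A =====
-- one row of the matrix: [1 if i > vertex else 0 for i in range(number)]
def hfRow (number vertex : Int) : List Int :=
  (PySem.List.pyRange 0 number 1).map (fun i => if vertex < i then (1 : Int) else 0)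

-- the while loop; fuel bounds the iterations (the Python loop diverges for number < 0, excluded by Pre_)
def hfRows (number : Int) : Nat → Int → List (List Int)
  | 0, _ => []
  | fuel + 1, vertex =>
      if vertex = number then []
      else hfRow number vertex :: hfRows number fuel (vertex + 1)

def handshakes_of_friends (number : Int) : String :=
  let graph_matrix := hfRows number (number.toNat + 1) 0
  let ribs := graph_matrix.foldl
    (fun r line => line.foldl (fun r el => if el = 1 then r + 1 else r) r) (0 : Int)
  "Количество рукопожатий " ++ PySem.Int.toStr number ++ " друзей составило " ++ PySem.Int.toStr ribs

-- ===== PORT B =====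
def handshakes_of_friends_alt (number : Int) : String :=
  let ribs := PySem.Int.floordiv (number * (number - 1)) 2
  "Количество рукопожатий " ++ PySem.Int.toStr number ++ " друзей составило " ++ PySem.Int.toStr ribs

-- ===== PRECONDITION & SPEC =====
-- A's while loop never terminates for number < 0 (vertex counts up from 0 and is never equal to number).
def Pre_handshakes_of_friends (number : Int) : Prop := 0 ≤ number
instance (number : Int) : Decidable (Pre_handshakes_of_friends number) := by
  unfold Pre_handshakes_of_friends; infer_instance

def pvWitness_handshakes_of_friends : Int := 5

def Spec_handshakes_of_friends (number : Int) (out : String) : Prop := out = handshakes_of_friends_alt number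
instance (number : Int) (out : String) : Decidable (Spec_handshakes_of_friends number out) := by unfold Spec_handshakes_of_friends; infer_instance

-- ===== CLAIM (what is proved, stated in full; the proofs are below) =====
def Claim_equal_handshakes_of_friends : Prop := ∀ (number : Int), Dom_handshakes_of_friends number → Pre_handshakes_of_friends number → Spec_handshakes_of_friends number (handshakes_of_friends number)

-- ===== LEMMAS AND PROOFS =====

-- triangle numbers: tri k = 0 + 1 + ... + (k-1)
def tri : Nat → Nat
  | 0 => 0
  | k + 1 => k + tri k

theorem tri_int (k : Nat) : 2 * (tri k : Int) = (k : Int) * ((k : Int) - 1) := by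
  induction k with
  | zero => simp [tri]
  | succ n ih =>
      simp only [tri]
      push_cast
      linear_combination ih

-- the inner fold ignores a map-segment whose indices are all ≤ vertex
theorem hf_fold_zero (vertex : Int) (l : List Int) (r : Int)
    (h : ∀ i ∈ l, ¬ vertex < i) :
    (l.map (fun i => if vertex < i then (1 : Int) else 0)).foldl
      (fun r el => if el = 1 then r + 1 else r) r = r := by
  induction l generalizing r with
  | nil => rfl
  | cons a t ih =>
      have ha : ¬ vertex < a := h a (List.mem_cons_self)
      simp only [List.map_cons, List.foldl_cons, if_neg ha]
      have : (if (0 : Int) = 1 then r + 1 else r) = r := by norm_num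
      rw [this]
      exact ih r (fun i hi => h i (List.mem_cons_of_mem _ hi))

-- the inner fold adds the length of a map-segment whose indices are all > vertex
theorem hf_fold_one (vertex : Int) (l : List Int) (r : Int)
    (h : ∀ i ∈ l, vertex < i) :
    (l.map (fun i => if vertex < i then (1 : Int) else 0)).foldl
      (fun r el => if el = 1 then r + 1 else r) r = r + l.length := by
  induction l generalizing r with
  | nil => simp
  | cons a t ih =>
      have ha : vertex < a := h a (List.mem_cons_self)
      simp only [List.map_cons, List.foldl_cons, if_pos ha, if_true]
      rw [ih (r + 1) (fun i hi => h i (List.mem_cons_of_mem _ hi))]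
      simp; ring

-- the ones in row `vertex` number (number - vertex - 1)
theorem hf_row_count (number vertex r : Int) (h0 : 0 ≤ vertex) (h1 : vertex < number) :
    (hfRow number vertex).foldl (fun r el => if el = 1 then r + 1 else r) r
      = r + (number - vertex - 1) := by
  unfold hfRow
  rw [PySem.List.pyRange_one_append 0 (vertex + 1) number (by omega) (by omega)]
  rw [List.map_append, List.foldl_append]
  rw [hf_fold_zero vertex _ r (by
    intro i hi
    have := (PySem.List.mem_pyRange_one (x := i) (a := 0) (b := vertex + 1)).1 hi
    omega)]
  rw [hf_fold_one vertex _ r (by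
    intro i hi
    have := (PySem.List.mem_pyRange_one (x := i) (a := vertex + 1) (b := number)).1 hi
    omega)]
  rw [PySem.List.length_pyRange_one]
  omega

theorem hf_rows_sum (number : Int) : ∀ (fuel : Nat) (vertex r : Int),
    0 ≤ vertex → vertex ≤ number → (number - vertex).toNat ≤ fuel →
    (hfRows number fuel vertex).foldl
      (fun r line => line.foldl (fun r el => if el = 1 then r + 1 else r) r) r
      = r + tri (number - vertex).toNat := by
  intro fuel
  induction fuel with
  | zero =>
      intro vertex r h0 h1 h2
      have : (number - vertex).toNat = 0 := by omega
      simp [hfRows, this, tri]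
  | succ n ih =>
      intro vertex r h0 h1 h2
      by_cases hv : vertex = number
      · have : (number - vertex).toNat = 0 := by omega
        simp [hfRows, hv, tri]
      · have hlt : vertex < number := lt_of_le_of_ne h1 hv
        simp only [hfRows, if_neg hv, List.foldl_cons]
        rw [hf_row_count number vertex r h0 hlt]
        rw [ih (vertex + 1) _ (by omega) (by omega) (by omega)]
        have hk : (number - vertex).toNat = (number - (vertex + 1)).toNat + 1 := by omega
        rw [hk, tri]
        have : ((number - (vertex + 1)).toNat : Int) = number - vertex - 1 := by omega
        push_cast
        omega

theorem hf_ribs (number : Int) (h : 0 ≤ number) :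
    (hfRows number (number.toNat + 1) 0).foldl
      (fun r line => line.foldl (fun r el => if el = 1 then r + 1 else r) r) (0 : Int)
      = PySem.Int.floordiv (number * (number - 1)) 2 := by
  rw [hf_rows_sum number (number.toNat + 1) 0 0 le_rfl h (by omega)]
  set k := (number - 0).toNat with hk
  have hn : number = (k : Int) := by omega
  have hmul : number * (number - 1) = 2 * (tri k : Int) := by
    rw [hn]; linear_combination -tri_int k
  rw [hmul, PySem.Int.floordiv_eq_ediv_of_pos (by norm_num)]
  rw [Int.mul_ediv_cancel_left _ (by norm_num)]
  omega

-- ===== VERDICT (by name: the statement is the Claim_ definition above) =====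
theorem handshakes_of_friends_spec : Claim_equal_handshakes_of_friends := by
  intro number _ hpre
  unfold Spec_handshakes_of_friends handshakes_of_friends handshakes_of_friends_alt
  simp only []
  rw [hf_ribs number hpre]
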